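-- pv_equiv track=rewrite | github.com/firedial/til | polyomino/pulp.py | getIdsList
-- ===== SOURCE A (Python) =====
-- import copy
--
-- def getIdsList(bools, ids):
--     result = [ids.copy()]
--     for i, b in enumerate(bools):
--         if b:
--             tmp = copy.deepcopy(result)
--             for row in tmp:
--                 row[i] *= -1
--                 result.append(row)
--
--     return result
-- ===== SOURCE B (Python) =====
-- def getIdsList(bools, ids):
--     true_positions = [i for i, b in enumerate(bools) if b]
--     result = []
--     for n in range(1 << len(true_positions)):
--         row = list(ids)
--         m = n
--         for p in true_positions:
--             if m & 1:
--                 row[p] = -row[p]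
--             m >>= 1
--         result.append(row)
--     return result
-- ===== Notes on version B (the rewrite author's own statement) =====
-- stated objective: alternative
-- what changed: A doubles an accumulated result list in place for each true flag (deep-copying and negating it); B first collects the true positions and then builds each of the 2^k rows directly from the bits of its index n (LSB = first true position).
import Mathlib
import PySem

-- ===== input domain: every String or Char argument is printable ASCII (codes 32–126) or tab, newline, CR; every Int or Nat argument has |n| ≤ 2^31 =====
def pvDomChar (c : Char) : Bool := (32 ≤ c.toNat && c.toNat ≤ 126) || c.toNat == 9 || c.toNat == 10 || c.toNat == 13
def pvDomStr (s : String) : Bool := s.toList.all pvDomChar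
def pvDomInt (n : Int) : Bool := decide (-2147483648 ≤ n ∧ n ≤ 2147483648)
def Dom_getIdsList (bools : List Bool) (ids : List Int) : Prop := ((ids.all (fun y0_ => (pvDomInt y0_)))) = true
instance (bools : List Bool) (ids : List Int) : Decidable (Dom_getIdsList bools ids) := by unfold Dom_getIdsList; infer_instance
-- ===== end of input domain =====

-- B replaces A's result-doubling loop by a direct enumeration: collect the true positions,
-- then build row n from the bits of n (LSB = first true position). Objective: alternative
-- decomposition (same asymptotic cost; the output is exponential in the number of true flags).


-- ===== PORT A =====
-- `row[i] *= -1` for a Nat index i (Python raises IndexError when i ≥ len(row);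
-- that case is excluded by Pre_, here it is a no-op: List.set out of range does nothing).
def negAt (row : List Int) (i : Nat) : List Int := row.set i (-(row.getD i 0))

-- result = [ids.copy()]; for i, b in enumerate(bools): if b: append every row of a copy
-- of result with row[i] negated.  enumerate indices are ≥ 0, so `.toNat` is exact here.
def getIdsList (bools : List Bool) (ids : List Int) : List (List Int) :=
  (PySem.List.enumerate bools).foldl
    (fun result ib =>
      if ib.2 then result ++ result.map (fun row => negAt row ib.1.toNat) else result)
    [ids]

-- ===== PORT B =====
-- inner loop of Source B: for p in true_positions: if m & 1: row[p] = -row[p]; m >>= 1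
def applySigns : List Nat → List Int → Nat → List Int
  | [], row, _ => row
  | p :: ps, row, m => applySigns ps (if m % 2 = 1 then negAt row p else row) (m / 2)

def getIdsList_alt (bools : List Bool) (ids : List Int) : List (List Int) :=
  let truePositions : List Nat :=
    (PySem.List.enumerate bools).filterMap (fun ib => if ib.2 then some ib.1.toNat else none)
  (List.range (2 ^ truePositions.length)).map (fun n => applySigns truePositions ids n)

-- ===== PRECONDITION & SPEC =====
-- Pre_ excludes exactly the inputs where Python A raises IndexError:
-- a true flag at an index that is not a valid index into ids.
def Pre_getIdsList (bools : List Bool) (ids : List Int) : Prop :=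
  ∀ p ∈ PySem.List.enumerate bools, p.2 = true → p.1 < (ids.length : Int)
instance (bools : List Bool) (ids : List Int) : Decidable (Pre_getIdsList bools ids) := by
  unfold Pre_getIdsList; infer_instance

def pvWitness_getIdsList : List Bool × List Int := ([true, false, true], [1, 2, 3])

def Spec_getIdsList (bools : List Bool) (ids : List Int) (out : List (List Int)) : Prop := out = getIdsList_alt bools ids
instance (bools : List Bool) (ids : List Int) (out : List (List Int)) : Decidable (Spec_getIdsList bools ids out) := by unfold Spec_getIdsList; infer_instance

-- ===== CLAIM (what is proved, stated in full; the proofs are below) =====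
def Claim_equal_getIdsList : Prop := ∀ (bools : List Bool) (ids : List Int), Dom_getIdsList bools ids → Pre_getIdsList bools ids → Spec_getIdsList bools ids (getIdsList bools ids)

-- ===== LEMMAS AND PROOFS =====

-- the shared loop body on a list of (already filtered) true positions
def expandStep (res : List (List Int)) (p : Nat) : List (List Int) :=
  res ++ res.map (fun row => negAt row p)

-- A's fold over enumerate equals the fold of expandStep over the filtered positions.
theorem foldl_filter_pos (l : List (Int × Bool)) (acc : List (List Int)) :
    l.foldl (fun result ib =>
        if ib.2 then result ++ result.map (fun row => negAt row ib.1.toNat) else result) acc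
      = (l.filterMap (fun ib => if ib.2 then some ib.1.toNat else none)).foldl expandStep acc := by
  induction l generalizing acc with
  | nil => rfl
  | cons hd tl ih =>
    cases hd with
    | mk i b =>
      cases b <;> simp [expandStep, ih]

theorem applySigns_mod (ps : List Nat) (row : List Int) (n : Nat) :
    applySigns ps row n = applySigns ps row (n % 2 ^ ps.length) := by
  induction ps generalizing row n with
  | nil => rfl
  | cons p ps ih =>
    simp only [applySigns, List.length_cons]
    have h1 : n % 2 ^ (ps.length + 1) % 2 = n % 2 :=
      Nat.mod_mod_of_dvd n (by exact dvd_pow_self 2 (Nat.succ_ne_zero _))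
    have h2 : n % 2 ^ (ps.length + 1) / 2 = n / 2 % 2 ^ ps.length := by
      rw [pow_succ, mul_comm, Nat.mod_mul_right_div_self]
    rw [h2, ih]
    simp [h1]

theorem applySigns_append (ps : List Nat) (p : Nat) (row : List Int) (n : Nat) :
    applySigns (ps ++ [p]) row n =
      if (n / 2 ^ ps.length) % 2 = 1 then negAt (applySigns ps row n) p
      else applySigns ps row n := by
  induction ps generalizing row n with
  | nil => simp [applySigns]
  | cons q ps ih =>
    simp only [List.cons_append, applySigns, List.length_cons]
    rw [ih]
    have : n / 2 ^ (ps.length + 1) = n / 2 / 2 ^ ps.length := by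
      rw [pow_succ, mul_comm, Nat.div_div_eq_div_mul]
    rw [this]

-- main bridge: the doubling fold over ps is the bit-indexed enumeration
theorem expand_eq_enum (ps : List Nat) (ids : List Int) :
    ps.foldl expandStep [ids]
      = (List.range (2 ^ ps.length)).map (fun n => applySigns ps ids n) := by
  induction ps using List.reverseRecOn with
  | nil => rfl
  | append_singleton ps p ih =>
    rw [List.foldl_append, List.foldl_cons, List.foldl_nil, ih]
    simp only [expandStep, List.length_append, List.length_cons, List.length_nil]
    have hlen : 2 ^ (ps.length + 0 + 1) = 2 ^ ps.length + 2 ^ ps.length := by ring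
    rw [hlen, List.range_add, List.map_append, List.map_map]
    congr 1
    · -- low half: bit ps.length of n is 0
      apply List.map_congr_left
      intro n hn
      rw [List.mem_range] at hn
      rw [applySigns_append, Nat.div_eq_of_lt hn]
      simp
    · -- high half: bit ps.length of 2^k + m is 1, lower bits those of m
      rw [List.map_map]
      apply List.map_congr_left
      intro m hm
      rw [List.mem_range] at hm
      simp only [Function.comp]
      rw [applySigns_append]
      have hdiv : (2 ^ ps.length + m) / 2 ^ ps.length = 1 := by
        rw [Nat.add_comm, Nat.add_div_right _ (Nat.pos_of_ne_zero (by positivity)),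
          Nat.div_eq_of_lt hm]
      rw [hdiv]
      simp only [Nat.one_mod, if_true]
      congr 1
      rw [applySigns_mod ps ids (2 ^ ps.length + m), Nat.add_mod_left,
        Nat.mod_eq_of_lt hm]

theorem getIdsList_eq (bools : List Bool) (ids : List Int) :
    getIdsList bools ids = getIdsList_alt bools ids := by
  unfold getIdsList getIdsList_alt
  rw [foldl_filter_pos, expand_eq_enum]

-- ===== VERDICT (by name: the statement is the Claim_ definition above) =====
theorem getIdsList_spec : Claim_equal_getIdsList := by
  intro bools ids _ _
  unfold Spec_getIdsList
  exact getIdsList_eq bools ids
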